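-- pv_equiv track=rewrite | github.com/ZJU-Automated-Reasoning-Group/arlib | pdsmt/bool/simple_dpll.py | generate_formula
-- ===== SOURCE A (Python) =====
-- def generate_formula(n, formula, clause, i):
--     if i == n:
--         formula.append(clause.copy())
--         return
--     clause[i] = i + 1
--     generate_formula(n, formula, clause, i + 1)
--     clause[i] = -(i + 1)
--     generate_formula(n, formula, clause, i + 1)
--     return formula
-- ===== SOURCE B (Python) =====
-- def generate_formula(n, formula, clause, i):
--     if i == n:
--         formula.append(clause.copy())
--         return
--     for c in range(2 ** (n - i)):
--         row = clause.copy()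
--         for j in range(i, n):
--             row[j] = (j + 1) if (c // 2 ** (n - 1 - j)) % 2 == 0 else -(j + 1)
--         formula.append(row)
--     return formula
-- ===== Notes on version B (the rewrite author's own statement) =====
-- stated objective: alternative
-- what changed: Replaces the binary recursion (which mutates one shared clause and appends a copy at each leaf) by a single iterative enumeration of the integers 0..2^(n-i)-1, decoding each integer's bits into the sign assignments of one fresh row; Pre_ excludes i = n (both Pythons return None there) and inputs where A raises (i > n recursion, too-short clause).
import Mathlib
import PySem

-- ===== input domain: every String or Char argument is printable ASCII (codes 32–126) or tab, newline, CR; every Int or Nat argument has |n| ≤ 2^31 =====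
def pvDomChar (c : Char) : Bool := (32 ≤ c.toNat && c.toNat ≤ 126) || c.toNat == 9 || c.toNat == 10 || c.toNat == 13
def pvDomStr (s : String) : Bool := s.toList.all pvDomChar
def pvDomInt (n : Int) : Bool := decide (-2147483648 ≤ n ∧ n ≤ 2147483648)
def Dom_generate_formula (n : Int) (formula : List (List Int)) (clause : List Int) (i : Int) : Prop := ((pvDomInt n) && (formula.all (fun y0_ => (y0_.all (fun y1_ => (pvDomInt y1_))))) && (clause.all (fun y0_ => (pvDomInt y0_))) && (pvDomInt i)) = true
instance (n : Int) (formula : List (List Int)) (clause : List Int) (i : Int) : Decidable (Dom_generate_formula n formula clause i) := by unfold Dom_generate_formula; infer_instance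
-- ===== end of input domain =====

-- B replaces A's binary recursion (mutating one shared clause, appending at each leaf) by a single
-- iterative enumeration of the integers 0..2^(n-i)-1, decoding each integer's bits into one fresh
-- row (alternative, same cost). The theorems are about the return value only: A leaves the shared
-- `clause` filled with negated literals, B does not mutate `clause` at all.


-- `xs[j] = v` for a possibly negative Python index: exact whenever the assignment succeeds
-- (Pre_ guarantees every index both programs assign is in range)
def pySetIdx (xs : List Int) (j : Int) (v : Int) : List Int :=
  if j < 0 then xs.set ((xs.length : Int) + j).toNat v else xs.set j.toNat v

-- ===== PORT A =====
-- The Python mutates `formula` and `clause`; the pair carries both through the recursion.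
-- At i = n Python appends and returns None (excluded by Pre_); for i > n Python never terminates
-- (also excluded); the guards only make the recursion total.
def gfA (n : Int) (formula : List (List Int)) (clause : List Int) (i : Int) : List (List Int) × List Int :=
  if i = n then (formula ++ [clause], clause)
  else if _h : i < n then
    let r1 := gfA n formula (pySetIdx clause i (i + 1)) (i + 1)
    gfA n r1.1 (pySetIdx r1.2 i (-(i + 1))) (i + 1)
  else (formula, clause)
termination_by (n - i).toNat
decreasing_by all_goals omega

def generate_formula (n : Int) (formula : List (List Int)) (clause : List Int) (i : Int) : List (List Int) :=
  (gfA n formula clause i).1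

-- ===== PORT B =====
-- one row: `row = clause.copy(); for j in range(i, n): row[j] = ±(j+1)` with the sign read from
-- bit n-1-j of c  (`(c // 2**(n-1-j)) % 2`; 2 ^ (n-1-j).toNat is exact: within range(i, n), n-1-j ≥ 0)
def rowB (n : Int) (clause : List Int) (i : Int) (c : Int) : List Int :=
  (PySem.List.pyRange i n).foldl (fun row j =>
    pySetIdx row j
      (if PySem.Int.mod (PySem.Int.floordiv c ((2 : Int) ^ (n - 1 - j).toNat)) 2 = 0
       then j + 1 else -(j + 1))) clause

-- base case i = n: Source B appends clause.copy() and returns None (no list value; outside Pre_);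
-- the port returns the appended formula. Otherwise `range(2 ** (n - i))` (exact for i ≤ n, by
-- Pre_), one decoded row per counter, appended in order.
def generate_formula_alt (n : Int) (formula : List (List Int)) (clause : List Int) (i : Int) : List (List Int) :=
  if i = n then formula ++ [clause]
  else formula ++ (List.range (2 ^ (n - i).toNat)).map (fun c => rowB n clause i (Int.ofNat c))

-- ===== PRECONDITION & SPEC =====
-- Pre_ is exactly the domain on which both Pythons return a list: i < n and a clause long enough
-- for every assignment clause[j], j in range(i, n) (n ≤ len and 0 ≤ len + i). Excluded: i = n,
-- where both Pythons append clause.copy() and return None (no value of the declared type); i > n,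
-- where A's recursion never reaches n (RecursionError); and too-short clauses (IndexError).
def Pre_generate_formula (n : Int) (formula : List (List Int)) (clause : List Int) (i : Int) : Prop :=
  i < n ∧ n ≤ (clause.length : Int) ∧ 0 ≤ (clause.length : Int) + i
instance (n : Int) (formula : List (List Int)) (clause : List Int) (i : Int) : Decidable (Pre_generate_formula n formula clause i) := by unfold Pre_generate_formula; infer_instance

def pvWitness_generate_formula : Int × List (List Int) × List Int × Int := (2, [[7]], [0, 0], 0)

def Spec_generate_formula (n : Int) (formula : List (List Int)) (clause : List Int) (i : Int) (out : List (List Int)) : Prop := out = generate_formula_alt n formula clause i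
instance (n : Int) (formula : List (List Int)) (clause : List Int) (i : Int) (out : List (List Int)) : Decidable (Spec_generate_formula n formula clause i out) := by unfold Spec_generate_formula; infer_instance

-- ===== CLAIM (what is proved, stated in full; the proofs are below) =====
def Claim_equal_generate_formula : Prop := ∀ (n : Int) (formula : List (List Int)) (clause : List Int) (i : Int), Dom_generate_formula n formula clause i → Pre_generate_formula n formula clause i → Spec_generate_formula n formula clause i (generate_formula n formula clause i)

-- ===== LEMMAS AND PROOFS =====

-- final state of `clause` after A's recursion: positions i..n-1 (Python indices) overwritten with -(j+1)
def negAll (n : Int) (clause : List Int) (i : Int) : List Int :=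
  if _h : i < n then negAll n (pySetIdx clause i (-(i + 1))) (i + 1) else clause
termination_by (n - i).toNat
decreasing_by omega

-- the Nat position Python index j addresses in a list of length len
def pyPos (len : Nat) (j : Int) : Nat := if j < 0 then ((len : Int) + j).toNat else j.toNat

-- positions written by the loops still pending at counter j (Python indices j..n-1)
def inW (len : Nat) (n j : Int) (p : Nat) : Prop := ∃ j' : Int, j ≤ j' ∧ j' < n ∧ p = pyPos len j'

lemma pySetIdx_eq (xs : List Int) (j : Int) (v : Int) :
    pySetIdx xs j v = xs.set (pyPos xs.length j) v := by
  unfold pySetIdx pyPos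
  split_ifs <;> rfl

lemma pySetIdx_length (xs : List Int) (j : Int) (v : Int) :
    (pySetIdx xs j v).length = xs.length := by
  rw [pySetIdx_eq, List.length_set]

lemma negAll_length (n : Int) (cl : List Int) (i : Int) : (negAll n cl i).length = cl.length := by
  by_cases h : i < n
  · rw [negAll, dif_pos h, negAll_length, pySetIdx_length]
  · rw [negAll, dif_neg h]
termination_by (n - i).toNat
decreasing_by omega

-- negAll leaves every position outside its write set unchanged
lemma negAll_getElem?_outside (n : Int) (cl : List Int) (i : Int) (p : Nat)
    (hp : ¬ inW cl.length n i p) : (negAll n cl i)[p]? = cl[p]? := by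
  by_cases h : i < n
  · rw [negAll, dif_pos h,
      negAll_getElem?_outside n _ (i + 1) p
        (by rw [pySetIdx_length]; intro ⟨j', h1, h2, h3⟩; exact hp ⟨j', by omega, h2, h3⟩),
      pySetIdx_eq, List.getElem?_set_ne (fun he => hp ⟨i, le_refl i, h, he.symm⟩)]
  · rw [negAll, dif_neg h]
termination_by (n - i).toNat
decreasing_by omega

-- after writing position i on both sides, agreement outside the pending write set persists
lemma set_agree (n : Int) (x y : List Int) (i : Int) (v : Int)
    (hlen : x.length = y.length)
    (hagree : ∀ p : Nat, ¬ inW x.length n i p → x[p]? = y[p]?) :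
    ∀ p : Nat, ¬ inW (pySetIdx x i v).length n (i + 1) p →
      (pySetIdx x i v)[p]? = (pySetIdx y i v)[p]? := by
  intro p hp
  rw [pySetIdx_length] at hp
  have hpy : pyPos y.length i = pyPos x.length i := by rw [hlen]
  rw [pySetIdx_eq, pySetIdx_eq, hpy]
  by_cases hpi : p = pyPos x.length i
  · subst hpi
    rw [List.getElem?_set, List.getElem?_set, hlen]
    simp
  · rw [List.getElem?_set_ne (fun he => hpi he.symm),
      List.getElem?_set_ne (fun he => hpi he.symm)]
    refine hagree p (fun ⟨j', h1, h2, h3⟩ => ?_)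
    by_cases hji : j' = i
    · exact hpi (by rw [h3, hji])
    · exact hp ⟨j', by omega, h2, h3⟩

-- extensionality: negAll only looks at (and only writes) positions in its write set
lemma negAll_ext (n : Int) (x y : List Int) (i : Int)
    (hlen : x.length = y.length)
    (hagree : ∀ p : Nat, ¬ inW x.length n i p → x[p]? = y[p]?) :
    negAll n x i = negAll n y i := by
  by_cases h : i < n
  · rw [negAll, dif_pos h]
    conv_rhs => rw [negAll, dif_pos h]
    exact negAll_ext n _ _ (i + 1) (by rw [pySetIdx_length, pySetIdx_length, hlen])
      (set_agree n x y i _ hlen hagree)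
  · rw [negAll, dif_neg h]
    conv_rhs => rw [negAll, dif_neg h]
    apply List.ext_getElem?
    intro p
    exact hagree p (fun ⟨j', h1, h2, _⟩ => by omega)
termination_by (n - i).toNat
decreasing_by omega

-- the sign written for Python index j when the row counter is c
def signB (n : Int) (c : Int) (j : Int) : Int :=
  if PySem.Int.mod (PySem.Int.floordiv c ((2 : Int) ^ (n - 1 - j).toNat)) 2 = 0
  then j + 1 else -(j + 1)

lemma rowB_eq_fold (n : Int) (cl : List Int) (i : Int) (c : Int) :
    rowB n cl i c = (PySem.List.pyRange i n).foldl (fun row j => pySetIdx row j (signB n c j)) cl := rfl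

-- two-counter extensionality for the row fold: equal bits on pending indices + agreement outside
-- the pending write set give equal rows
lemma fold_ext (n : Int) (x y : List Int) (i : Int) (c d : Int)
    (hlen : x.length = y.length)
    (hagree : ∀ p : Nat, ¬ inW x.length n i p → x[p]? = y[p]?)
    (hbits : ∀ j : Int, i ≤ j → j < n → signB n c j = signB n d j) :
    (PySem.List.pyRange i n).foldl (fun row j => pySetIdx row j (signB n c j)) x
      = (PySem.List.pyRange i n).foldl (fun row j => pySetIdx row j (signB n d j)) y := by
  by_cases h : i < n
  · rw [PySem.List.pyRange_one_cons h, List.foldl_cons, List.foldl_cons,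
      show signB n c i = signB n d i from hbits i (le_refl i) h]
    exact fold_ext n _ _ (i + 1) c d (by rw [pySetIdx_length, pySetIdx_length, hlen])
      (set_agree n x y i _ hlen hagree) (fun j h1 h2 => hbits j (by omega) h2)
  · rw [PySem.List.pyRange_one_eq_nil (by omega), List.foldl_nil, List.foldl_nil]
    apply List.ext_getElem?
    intro p
    exact hagree p (fun ⟨j', h1, h2, _⟩ => by omega)
termination_by (n - i).toNat
decreasing_by omega

def rowsB (n : Int) (clause : List Int) (i : Int) : List (List Int) :=
  (List.range (2 ^ (n - i).toNat)).map (fun c => rowB n clause i (Int.ofNat c))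

-- Python's bit test on a nonnegative integer, reduced to Nat arithmetic
lemma bit_test (c k : Nat) :
    (PySem.Int.mod (PySem.Int.floordiv (Int.ofNat c) ((2 : Int) ^ k)) 2 = 0) ↔ c / 2 ^ k % 2 = 0 := by
  have h2 : ((2 : Int) ^ k) = (((2 ^ k : Nat) : Int)) := by push_cast; ring
  have h2' : ((2 : Int)) = (((2 : Nat) : Int)) := by norm_num
  rw [h2, show (Int.ofNat c) = ((c : Nat) : Int) from rfl, PySem.Int.floordiv_natCast, h2',
    PySem.Int.mod_natCast]
  omega

lemma low_bit_eq (M c k : Nat) (_hc : c < 2 ^ M) (hk : k < M) :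
    (2 ^ M + c) / 2 ^ k % 2 = c / 2 ^ k % 2 := by
  have h : 2 ^ M = 2 * 2 ^ (M - k - 1) * 2 ^ k := by
    rw [show (2 : ℕ) * 2 ^ (M - k - 1) = 2 ^ (M - k) by rw [← pow_succ']; congr 1; omega,
      ← pow_add]
    congr 1
    omega
  rw [h, mul_comm (2 * 2 ^ (M - k - 1)) (2 ^ k), Nat.mul_add_div (Nat.two_pow_pos k)]
  omega

lemma top_bit_lo (M c : Nat) (hc : c < 2 ^ M) : c / 2 ^ M % 2 = 0 := by
  rw [Nat.div_eq_of_lt hc]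

lemma top_bit_hi (M c : Nat) (hc : c < 2 ^ M) : (2 ^ M + c) / 2 ^ M % 2 = 1 := by
  rw [Nat.add_comm, Nat.add_div_right c (Nat.two_pow_pos M), Nat.div_eq_of_lt hc]

lemma signB_low (n i : Int) (c cc : Nat) (M : Nat) (hM : (n - 1 - i).toNat = M)
    (hc : cc < 2 ^ M) (j : Int) (hj1 : i + 1 ≤ j) (hj2 : j < n)
    (hcc : c = 2 ^ M + cc) :
    signB n (Int.ofNat c) j = signB n (Int.ofNat cc) j := by
  unfold signB
  refine if_congr ?_ rfl rfl
  rw [bit_test, bit_test, hcc, low_bit_eq M cc (n - 1 - j).toNat hc (by omega)]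

-- the main invariant: A's recursion returns (formula ++ all rows, clause with i..n-1 negated)
lemma gfA_eq (M : Nat) (n : Int) (f : List (List Int)) (cl : List Int) (i : Int)
    (hM : (n - i).toNat = M) (hin : i ≤ n) (hlen : n ≤ (cl.length : Int))
    (hneg : 0 ≤ (cl.length : Int) + i) :
    gfA n f cl i = (f ++ rowsB n cl i, negAll n cl i) := by
  induction M generalizing f cl i with
  | zero =>
    have hi_eq : i = n := by omega
    rw [gfA, if_pos hi_eq, negAll, dif_neg (by omega)]
    have : rowsB n cl i = [cl] := by
      unfold rowsB
      rw [show (n - i).toNat = 0 by omega]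
      simp only [pow_zero, List.range_one, List.map_cons, List.map_nil]
      unfold rowB
      rw [PySem.List.pyRange_one_eq_nil (by omega), List.foldl_nil]
    rw [this]
  | succ M ih =>
    have hlt : i < n := by omega
    rw [gfA, if_neg (by omega), dif_pos hlt]
    simp only
    set c1 := pySetIdx cl i (i + 1) with hc1
    have hlen1 : c1.length = cl.length := by rw [hc1, pySetIdx_length]
    rw [ih f c1 (i + 1) (by omega) (by omega) (by rw [hlen1]; omega) (by rw [hlen1]; omega)]
    simp only
    set c2 := pySetIdx (negAll n c1 (i + 1)) i (-(i + 1)) with hc2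
    have hlen2 : c2.length = cl.length := by
      rw [hc2, pySetIdx_length, negAll_length, hlen1]
    rw [ih (f ++ rowsB n c1 (i + 1)) c2 (i + 1) (by omega) (by omega) (by rw [hlen2]; omega)
      (by rw [hlen2]; omega)]
    -- c2 agrees with pySetIdx cl i (-(i+1)) outside the pending write set W(i+1)
    have hagree2 : ∀ p : Nat, ¬ inW c2.length n (i + 1) p →
        c2[p]? = (pySetIdx cl i (-(i + 1)))[p]? := by
      intro p hp
      rw [hlen2] at hp
      have hq : pyPos (negAll n c1 (i + 1)).length i = pyPos cl.length i := by
        rw [negAll_length, hlen1]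
      rw [hc2, pySetIdx_eq, pySetIdx_eq, hq]
      by_cases hpi : p = pyPos cl.length i
      · subst hpi
        rw [List.getElem?_set, List.getElem?_set, negAll_length, hlen1]
        simp
      · rw [List.getElem?_set_ne (fun he => hpi he.symm),
          List.getElem?_set_ne (fun he => hpi he.symm),
          negAll_getElem?_outside n c1 (i + 1) p (by rw [hlen1]; exact hp),
          hc1, pySetIdx_eq, List.getElem?_set_ne (fun he => hpi he.symm)]
    have hsnd : negAll n c2 (i + 1) = negAll n cl i := by
      conv_rhs => rw [negAll, dif_pos hlt]
      exact negAll_ext n c2 (pySetIdx cl i (-(i + 1))) (i + 1)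
        (by rw [hlen2, pySetIdx_length]) hagree2
    have hM1 : (n - 1 - i).toNat = M := by omega
    have hrows : rowsB n cl i = rowsB n c1 (i + 1) ++ rowsB n c2 (i + 1) := by
      unfold rowsB
      rw [show (n - i).toNat = M + 1 by omega, show (n - (i + 1)).toNat = M by omega,
        pow_succ, mul_two, List.range_add, List.map_append, List.map_map]
      congr 1
      · -- low half: top bit 0, the head write is i+1, then the folds coincide
        apply List.map_congr_left
        intro c hc
        rw [List.mem_range] at hc
        rw [rowB_eq_fold, rowB_eq_fold, PySem.List.pyRange_one_cons hlt, List.foldl_cons, hc1]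
        congr 2
        unfold signB
        rw [if_pos (by rw [bit_test, hM1]; exact top_bit_lo M c hc)]
      · -- high half: top bit 1, head write -(i+1); lower bits of 2^M + c equal those of c,
        -- and c2 agrees with pySetIdx cl i (-(i+1)) outside the pending writes
        apply List.map_congr_left
        intro c hc
        rw [List.mem_range] at hc
        simp only [Function.comp]
        rw [rowB_eq_fold, rowB_eq_fold, PySem.List.pyRange_one_cons hlt, List.foldl_cons,
          show pySetIdx cl i (signB n (Int.ofNat (2 ^ M + c)) i) = pySetIdx cl i (-(i + 1)) from by
            congr 1
            unfold signB
            rw [if_neg (by rw [bit_test, hM1, top_bit_hi M c hc]; omega)]]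
        refine fold_ext n (pySetIdx cl i (-(i + 1))) c2 (i + 1)
          (Int.ofNat (2 ^ M + c)) (Int.ofNat c)
          (by rw [pySetIdx_length, hlen2]) ?_
          (fun j h1 h2 => signB_low n i (2 ^ M + c) c M hM1 hc j h1 h2 rfl)
        intro p hp
        rw [pySetIdx_length] at hp
        exact (hagree2 p (by rw [hlen2]; exact hp)).symm
    rw [hsnd, hrows, List.append_assoc]

-- ===== VERDICT (by name: the statement is the Claim_ definition above) =====
theorem generate_formula_spec : Claim_equal_generate_formula := by
  intro n f cl i _hdom hpre
  unfold Spec_generate_formula generate_formula generate_formula_alt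
  obtain ⟨h1, h2, h3⟩ := hpre
  rw [if_neg (by omega), gfA_eq (n - i).toNat n f cl i rfl (by omega) h2 (by omega)]
  rfl
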